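-- pv_equiv track=rewrite | github.com/alfuente/tsunami-beta | risk-graph-loader/app/risk_loader_improved.py | extract_tld_fallback
-- ===== SOURCE A (Python) =====
-- COMMON_TLDS = {
--     'cl', 'com', 'org', 'net', 'edu', 'gov', 'mil', 'int', 'co.uk', 'co.jp', 'co.kr',
--     'com.au', 'com.br', 'com.cn', 'com.mx', 'co.za', 'de', 'fr', 'it', 'es', 'ru',
--     'jp', 'kr', 'au', 'br', 'cn', 'mx', 'za', 'uk', 'ca', 'us', 'ar', 'pe', 'co',
--     'ec', 'bo', 'py', 'uy', 've', 'mx', 'gt', 'pa', 'cr', 'ni', 'hn', 'sv', 'do',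
--     'cu', 'jm', 'ht', 'tt', 'bb', 'gd', 'lc', 'vc', 'ag', 'dm', 'kn', 'ms', 'ai',
--     'vg', 'vi', 'pr', 'ad', 'mc', 'sm', 'va', 'li', 'ch', 'at', 'be', 'nl', 'lu',
--     'dk', 'se', 'no', 'fi', 'is', 'ie', 'pt', 'mt', 'cy', 'gr', 'bg', 'ro', 'hu',
--     'sk', 'cz', 'pl', 'lt', 'lv', 'ee', 'si', 'hr', 'ba', 'rs', 'me', 'mk', 'al',
--     'by', 'ua', 'md', 'ge', 'am', 'az', 'kz', 'kg', 'tj', 'tm', 'uz', 'mn', 'in',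
--     'pk', 'bd', 'lk', 'mv', 'bt', 'np', 'af', 'ir', 'iq', 'sy', 'lb', 'jo', 'ps',
--     'il', 'tr', 'cy', 'eg', 'ly', 'tn', 'dz', 'ma', 'sd', 'so', 'dj', 'er', 'et',
--     'ke', 'ug', 'tz', 'rw', 'bi', 'mw', 'zm', 'zw', 'bw', 'na', 'sz', 'ls', 'mg',
--     'mu', 'sc', 'km', 'yt', 're', 'mz', 'ao', 'gh', 'tg', 'bj', 'bf', 'ne', 'ci',
--     'lr', 'sl', 'gn', 'gw', 'cv', 'sn', 'gm', 'ml', 'mr', 'eh', 'st', 'gq', 'ga',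
--     'cg', 'cf', 'cd', 'cm', 'td', 'ng', 'bv', 'sj', 'gl', 'fo', 'ax', 'gf', 'sr',
--     'gy', 'fk', 'gs', 'sh', 'ac', 'ta', 'io', 'tf', 'hm', 'aq', 'pn', 'ck', 'nu',
--     'tk', 'to', 'ws', 'ki', 'tv', 'fj', 'vu', 'nc', 'pg', 'sb', 'nf', 'as', 'gu',
--     'mp', 'pw', 'mh', 'fm', 'um', 'cc', 'cx', 'cw', 'sx', 'bq', 'gp', 'mq', 'bl',
--     'mf', 'pm', 'wf', 'pf', 'tk', 'je', 'gg', 'im', 'za', 'info', 'name', 'travel',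
--     'museum', 'biz', 'pro', 'aero', 'coop', 'jobs', 'mobi', 'tel', 'asia', 'cat',
--     'xxx', 'post', 'travel', 'arpa'
-- }
--
-- def extract_tld_fallback(fqdn: str):
--     """Fallback TLD extraction when tldextract is not available."""
--     parts = fqdn.split('.')
--     if len(parts) < 2:
--         return None, fqdn, ''
--
--     # Try to match known TLDs (including multi-part ones like co.uk)
--     for i in range(len(parts) - 1):
--         potential_tld = '.'.join(parts[i:])
--         if potential_tld in COMMON_TLDS:
--             domain = parts[i-1] if i > 0 else parts[0]
--             subdomain = '.'.join(parts[:i-1]) if i > 1 else ''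
--             return domain, potential_tld, subdomain
--
--     # Fallback to simple parsing
--     domain = parts[-2]
--     tld = parts[-1]
--     subdomain = '.'.join(parts[:-2]) if len(parts) > 2 else ''
--
--     return domain, tld, subdomain
-- ===== SOURCE B (Python) =====
-- # B: the scan over suffixes can only ever match the one 2-part suffix, so test it directly.
-- _MULTI_TLDS = {'co.uk', 'co.jp', 'co.kr', 'com.au', 'com.br', 'com.cn', 'com.mx', 'co.za'}
--
-- def extract_tld_fallback(fqdn: str):
--     """Fallback TLD extraction when tldextract is not available."""
--     parts = fqdn.split('.')
--     n = len(parts)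
--     if n < 2:
--         return None, fqdn, ''
--     suffix = parts[-2] + '.' + parts[-1]
--     if suffix in _MULTI_TLDS:
--         if n == 2:
--             return parts[0], suffix, ''
--         return parts[-3], suffix, '.'.join(parts[:-3])
--     return parts[-2], parts[-1], '.'.join(parts[:-2]) if n > 2 else ''
-- ===== Notes on version B (the rewrite author's own statement) =====
-- stated objective: simpler
-- what changed: Replaces A's loop over all suffixes (which can only ever match the single 2-part suffix, since 1-part TLDs are out of the loop's range and longer joins contain too many dots to be in the set) with direct checks of the last two labels against the 8 dotted TLDs.
import Mathlib
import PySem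

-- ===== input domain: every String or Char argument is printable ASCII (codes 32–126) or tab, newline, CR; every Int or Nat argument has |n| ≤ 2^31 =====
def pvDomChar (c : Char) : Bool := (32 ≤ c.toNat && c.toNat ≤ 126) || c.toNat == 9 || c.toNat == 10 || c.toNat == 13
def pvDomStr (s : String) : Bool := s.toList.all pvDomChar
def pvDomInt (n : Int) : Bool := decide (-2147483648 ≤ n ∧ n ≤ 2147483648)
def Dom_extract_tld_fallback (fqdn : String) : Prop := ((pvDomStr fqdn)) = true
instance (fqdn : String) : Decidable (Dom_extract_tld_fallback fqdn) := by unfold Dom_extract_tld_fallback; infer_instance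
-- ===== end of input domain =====

-- B replaces A's suffix-scanning loop (which can only ever match the single 2-part suffix) by
-- direct checks of the last two labels, for simplicity; same return value everywhere.

-- ===== PORT A =====
-- Python's COMMON_TLDS set literal, in source order (duplicates kept; only membership is used)
def pvCOMMON_TLDS : List String := [
  "cl", "com", "org", "net", "edu", "gov", "mil", "int", "co.uk", "co.jp", "co.kr", "com.au",
  "com.br", "com.cn", "com.mx", "co.za", "de", "fr", "it", "es", "ru", "jp", "kr", "au",
  "br", "cn", "mx", "za", "uk", "ca", "us", "ar", "pe", "co", "ec", "bo",
  "py", "uy", "ve", "mx", "gt", "pa", "cr", "ni", "hn", "sv", "do", "cu",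
  "jm", "ht", "tt", "bb", "gd", "lc", "vc", "ag", "dm", "kn", "ms", "ai",
  "vg", "vi", "pr", "ad", "mc", "sm", "va", "li", "ch", "at", "be", "nl",
  "lu", "dk", "se", "no", "fi", "is", "ie", "pt", "mt", "cy", "gr", "bg",
  "ro", "hu", "sk", "cz", "pl", "lt", "lv", "ee", "si", "hr", "ba", "rs",
  "me", "mk", "al", "by", "ua", "md", "ge", "am", "az", "kz", "kg", "tj",
  "tm", "uz", "mn", "in", "pk", "bd", "lk", "mv", "bt", "np", "af", "ir",
  "iq", "sy", "lb", "jo", "ps", "il", "tr", "cy", "eg", "ly", "tn", "dz",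
  "ma", "sd", "so", "dj", "er", "et", "ke", "ug", "tz", "rw", "bi", "mw",
  "zm", "zw", "bw", "na", "sz", "ls", "mg", "mu", "sc", "km", "yt", "re",
  "mz", "ao", "gh", "tg", "bj", "bf", "ne", "ci", "lr", "sl", "gn", "gw",
  "cv", "sn", "gm", "ml", "mr", "eh", "st", "gq", "ga", "cg", "cf", "cd",
  "cm", "td", "ng", "bv", "sj", "gl", "fo", "ax", "gf", "sr", "gy", "fk",
  "gs", "sh", "ac", "ta", "io", "tf", "hm", "aq", "pn", "ck", "nu", "tk",
  "to", "ws", "ki", "tv", "fj", "vu", "nc", "pg", "sb", "nf", "as", "gu",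
  "mp", "pw", "mh", "fm", "um", "cc", "cx", "cw", "sx", "bq", "gp", "mq",
  "bl", "mf", "pm", "wf", "pf", "tk", "je", "gg", "im", "za", "info", "name",
  "travel", "museum", "biz", "pro", "aero", "coop", "jobs", "mobi", "tel", "asia", "cat", "xxx",
  "post", "travel", "arpa"]

-- the 'for i in range(len(parts) - 1)' loop of A, over the list of remaining indices
def pvTldLoopA (parts : List String) : List Int → Option (Option String × String × String)
  | [] => none
  | i :: rest =>
    let potential := PySem.Str.join "." (PySem.List.slice parts (some i) none)
    if pvCOMMON_TLDS.contains potential then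
      some (some (if i > 0 then PySem.List.pyGetD parts (i - 1) "" else PySem.List.pyGetD parts 0 ""),
            potential,
            if i > 1 then PySem.Str.join "." (PySem.List.slice parts none (some (i - 1))) else "")
    else pvTldLoopA parts rest

def extract_tld_fallback (fqdn : String) : Option String × String × String :=
  let parts := (PySem.Str.split? fqdn ".").getD []   -- sep ≠ "", so split? is always 'some'
  if parts.length < 2 then (none, fqdn, "")
  else
    match pvTldLoopA parts (PySem.List.pyRange 0 ((parts.length : Int) - 1) 1) with
    | some r => r
    | none =>
      (some (PySem.List.pyGetD parts (-2) ""),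
       PySem.List.pyGetD parts (-1) "",
       if parts.length > 2 then PySem.Str.join "." (PySem.List.slice parts none (some (-2))) else "")

-- ===== PORT B =====
def pvMULTI_TLDS : List String := ["co.uk", "co.jp", "co.kr", "com.au", "com.br", "com.cn", "com.mx", "co.za"]

def extract_tld_fallback_alt (fqdn : String) : Option String × String × String :=
  let parts := (PySem.Str.split? fqdn ".").getD []   -- sep ≠ "", so split? is always 'some'
  let n := parts.length
  if n < 2 then (none, fqdn, "")
  else
    -- parts[-2] + '.' + parts[-1], concatenated exactly at code-point level
    let suffix := String.ofList ((PySem.List.pyGetD parts (-2) "").toList ++ '.' :: (PySem.List.pyGetD parts (-1) "").toList)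
    if pvMULTI_TLDS.contains suffix then
      if n == 2 then (some (PySem.List.pyGetD parts 0 ""), suffix, "")
      else (some (PySem.List.pyGetD parts (-3) ""), suffix,
            PySem.Str.join "." (PySem.List.slice parts none (some (-3))))
    else
      (some (PySem.List.pyGetD parts (-2) ""),
       PySem.List.pyGetD parts (-1) "",
       if n > 2 then PySem.Str.join "." (PySem.List.slice parts none (some (-2))) else "")

-- ===== PRECONDITION & SPEC =====
def Spec_extract_tld_fallback (fqdn : String) (out : Option String × String × String) : Prop := out = extract_tld_fallback_alt fqdn
instance (fqdn : String) (out : Option String × String × String) : Decidable (Spec_extract_tld_fallback fqdn out) := by unfold Spec_extract_tld_fallback; infer_instance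

-- ===== CLAIM (what is proved, stated in full; the proofs are below) =====
def Claim_equal_extract_tld_fallback : Prop := ∀ (fqdn : String), Dom_extract_tld_fallback fqdn → Spec_extract_tld_fallback fqdn (extract_tld_fallback fqdn)

-- ===== LEMMAS AND PROOFS =====

-- joining k parts with '.' yields at least k-1 dots (on the char side first)
lemma pv_chars_count_dot_join (ls : List (List Char)) :
    ls.length - 1 ≤ (PySem.Chars.join ['.'] ls).count '.' := by
  match ls with
  | [] => simp
  | [p] => simp
  | p :: q :: rest =>
    rw [PySem.Chars.join_cons_cons]
    have ih := pv_chars_count_dot_join (q :: rest)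
    simp only [List.count_append, List.length_cons] at *
    have : ['.'].count '.' = 1 := by decide
    omega

lemma pv_count_dot_join (ls : List String) :
    ls.length - 1 ≤ (PySem.Str.join "." ls).toList.count '.' := by
  rw [PySem.Str.toList_join]
  have := pv_chars_count_dot_join (ls.map String.toList)
  simpa using this

-- every COMMON_TLDS entry has at most one dot
set_option maxRecDepth 8192 in
lemma pv_common_le_one : ∀ s ∈ pvCOMMON_TLDS, s.toList.count '.' ≤ 1 := by decide

-- strings with a dot are in COMMON_TLDS iff in MULTI_TLDS
set_option maxRecDepth 8192 in
lemma pv_common_eq_multi (t : String) (h : 1 ≤ t.toList.count '.') :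
    pvCOMMON_TLDS.contains t = pvMULTI_TLDS.contains t := by
  have hmc : ∀ s ∈ pvMULTI_TLDS, s ∈ pvCOMMON_TLDS := by decide
  have hcm : ∀ s ∈ pvCOMMON_TLDS, s ∈ pvMULTI_TLDS ∨ s.toList.count '.' = 0 := by decide
  cases hC : pvCOMMON_TLDS.contains t with
  | false =>
    cases hM : pvMULTI_TLDS.contains t with
    | false => rfl
    | true =>
      have := hmc t (List.contains_iff_mem.mp hM)
      rw [List.contains_iff_mem.mpr this] at hC
      simp at hC
  | true =>
    rcases hcm t (List.contains_iff_mem.mp hC) with hm | h0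
    · rw [List.contains_iff_mem.mpr hm]
    · omega

-- a suffix of ≥ 3 labels is never in COMMON_TLDS
lemma pv_skip (parts : List String) (i : Int) (h0 : 0 ≤ i) (hi : i < (parts.length : Int) - 2) :
    pvCOMMON_TLDS.contains (PySem.Str.join "." (PySem.List.slice parts (some i) none)) = false := by
  rw [PySem.List.slice_from parts h0]
  have hlen : 3 ≤ (parts.drop i.toNat).length := by
    simp only [List.length_drop]; omega
  have hcnt := pv_count_dot_join (parts.drop i.toNat)
  cases hC : pvCOMMON_TLDS.contains (PySem.Str.join "." (parts.drop i.toNat)) with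
  | false => rfl
  | true =>
    have := pv_common_le_one _ (List.contains_iff_mem.mp hC)
    omega

-- the loop reduces to its last index n-2
lemma pv_loop_reduce (parts : List String) (a : Int) (h0 : 0 ≤ a) (ha : a ≤ (parts.length : Int) - 2) :
    pvTldLoopA parts (PySem.List.pyRange a ((parts.length : Int) - 1) 1)
      = pvTldLoopA parts [(parts.length : Int) - 2] := by
  induction hk : ((parts.length : Int) - 2 - a).toNat generalizing a with
  | zero =>
    have haeq : a = (parts.length : Int) - 2 := by omega
    subst haeq
    rw [PySem.List.pyRange_one_cons (by omega)]
    have h1 : (parts.length : Int) - 2 + 1 = (parts.length : Int) - 1 := by ring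
    rw [h1]
    have h2 : PySem.List.pyRange ((parts.length : Int) - 1) ((parts.length : Int) - 1) 1 = [] := by
      simp [pysem]
    rw [h2]
  | succ k ih =>
    have halt : a < (parts.length : Int) - 2 := by omega
    rw [PySem.List.pyRange_one_cons (by omega)]
    simp only [pvTldLoopA, pv_skip parts a h0 halt, Bool.false_eq_true, if_false]
    exact ih (a + 1) (by omega) (by omega) (by omega)

-- the two per-branch computations agree for any list of ≥ 2 labels
lemma pv_main (parts : List String) (hlt : ¬ parts.length < 2) :
    (match pvTldLoopA parts (PySem.List.pyRange 0 ((parts.length : Int) - 1) 1) with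
      | some r => r
      | none =>
        (some (PySem.List.pyGetD parts (-2) ""), PySem.List.pyGetD parts (-1) "",
          if parts.length > 2 then PySem.Str.join "." (PySem.List.slice parts none (some (-2))) else "")) =
    (if pvMULTI_TLDS.contains
          (String.ofList
            ((PySem.List.pyGetD parts (-2) "").toList ++ '.' :: (PySem.List.pyGetD parts (-1) "").toList)) = true then
      if (parts.length == 2) = true then
        (some (PySem.List.pyGetD parts 0 ""),
          String.ofList ((PySem.List.pyGetD parts (-2) "").toList ++ '.' :: (PySem.List.pyGetD parts (-1) "").toList),
          "")
      else
        (some (PySem.List.pyGetD parts (-3) ""),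
          String.ofList ((PySem.List.pyGetD parts (-2) "").toList ++ '.' :: (PySem.List.pyGetD parts (-1) "").toList),
          PySem.Str.join "." (PySem.List.slice parts none (some (-3))))
    else
      (some (PySem.List.pyGetD parts (-2) ""), PySem.List.pyGetD parts (-1) "",
        if parts.length > 2 then PySem.Str.join "." (PySem.List.slice parts none (some (-2))) else "")) := by
  have hred := pv_loop_reduce parts 0 (by omega) (by omega)
  rw [hred]
  obtain ⟨pre, x, y, rfl⟩ : ∃ pre x y, parts = pre ++ [x, y] := by
    rcases hr : parts.reverse with _ | ⟨b, t⟩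
    · rw [List.reverse_eq_nil_iff] at hr; subst hr; simp at hlt
    · rcases t with _ | ⟨c, rest⟩
      · exfalso; have := congrArg List.length hr; simp at this; omega
      · exact ⟨rest.reverse, c, b, by rw [← parts.reverse_reverse, hr]; simp⟩
  have hA2 : PySem.List.pyGetD (pre ++ [x, y]) (-2) "" = x := by
    rw [PySem.List.pyGetD_neg_ofNat _ 2 "" (by omega) (by simp)]
    simp
  have hA1 : PySem.List.pyGetD (pre ++ [x, y]) (-1) "" = y := by
    rw [PySem.List.pyGetD_neg_ofNat _ 1 "" (by omega) (by simp)]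
    simp
  have hdrop : PySem.List.slice (pre ++ [x, y]) (some (((pre ++ [x, y]).length : Int) - 2)) none = [x, y] := by
    rw [PySem.List.slice_from _ (by simp only [List.length_append, List.length_cons, List.length_nil]; omega)]
    have ht : ((((pre ++ [x, y]).length : Int)) - 2).toNat = pre.length := by
      simp only [List.length_append, List.length_cons, List.length_nil]; omega
    rw [ht, List.drop_left]
  have hjoin : PySem.Str.join "." [x, y] = String.ofList (x.toList ++ '.' :: y.toList) := by
    simp [PySem.Str.join, PySem.Chars.join, List.intercalate]
  have hcnt : 1 ≤ (String.ofList (x.toList ++ '.' :: y.toList)).toList.count '.' := by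
    simp [List.count_append]
    omega
  have hCM := pv_common_eq_multi _ hcnt
  simp only [pvTldLoopA]
  rw [hdrop, hjoin, hA2, hA1, hCM]
  cases hc : pvMULTI_TLDS.contains (String.ofList (x.toList ++ '.' :: y.toList)) with
  | false => simp only [Bool.false_eq_true, if_false]
  | true =>
    simp only [if_true]
    by_cases hpre : pre = []
    · subst hpre
      norm_num
    · have hm : 1 ≤ pre.length := List.length_pos_iff.mpr hpre
      have hlen2 : (((pre ++ [x, y]).length == 2)) = false := by
        simp only [List.length_append, List.length_cons, List.length_nil, beq_eq_false_iff_ne,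
          ne_eq]
        omega
      have hgt0 : ((((pre ++ [x, y]).length : Int)) - 2 > 0) := by
        simp only [List.length_append, List.length_cons, List.length_nil]; push_cast; omega
      rw [if_pos hgt0, hlen2]
      simp only [Bool.false_eq_true, if_false]
      have hdom : PySem.List.pyGetD (pre ++ [x, y]) (((pre ++ [x, y]).length : Int) - 2 - 1) ""
          = PySem.List.pyGetD (pre ++ [x, y]) (-3) "" := by
        rw [PySem.List.pyGetD_eq_getElem _ _
            (by simp only [List.length_append, List.length_cons, List.length_nil]; push_cast; omega)
            (by simp only [List.length_append, List.length_cons, List.length_nil]; push_cast; omega),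
          PySem.List.pyGetD_neg_ofNat _ 3 "" (by omega) (by simp; omega)]
        congr 1
        simp only [List.length_append, List.length_cons, List.length_nil]
        omega
      rw [hdom]
      by_cases hm1 : pre.length = 1
      · have hng : ¬ ((((pre ++ [x, y]).length : Int)) - 2 > 1) := by
          simp only [List.length_append, List.length_cons, List.length_nil]; push_cast; omega
        rw [if_neg hng, PySem.List.slice_to_neg_ofNat _ 3 (by omega)]
        have h0 : (pre ++ [x, y]).length - 3 = 0 := by simp; omega
        rw [h0, List.take_zero, show PySem.Str.join "." ([] : List String) = "" from by decide]
      · have hg : ((((pre ++ [x, y]).length : Int)) - 2 > 1) := by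
          simp only [List.length_append, List.length_cons, List.length_nil]; push_cast; omega
        rw [if_pos hg, PySem.List.slice_to_neg_ofNat _ 3 (by omega),
          PySem.List.slice_to _ (by simp only [List.length_append, List.length_cons, List.length_nil]; push_cast; omega)]
        have hidx : ((((pre ++ [x, y]).length : Int)) - 2 - 1).toNat = (pre ++ [x, y]).length - 3 := by
          simp only [List.length_append, List.length_cons, List.length_nil]; omega
        rw [hidx]

-- ===== VERDICT (by name: the statement is the Claim_ definition above) =====
theorem extract_tld_fallback_spec : Claim_equal_extract_tld_fallback := by
  unfold Claim_equal_extract_tld_fallback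
  intro fqdn _
  unfold Spec_extract_tld_fallback extract_tld_fallback extract_tld_fallback_alt
  simp only []
  by_cases hlt : ((PySem.Str.split? fqdn ".").getD []).length < 2
  · simp [hlt]
  · simp only [if_neg hlt]
    exact pv_main _ hlt
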